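-- pv_equiv track=rewrite | github.com/srikantharun/test-api | hw/ip/aic_ls/default/dv/uvm/refmodels/dmc_addr_gen_ref_model/vtrsp_data_gen.py | hex_to_int8_list
-- ===== SOURCE A (Python) =====
-- def hex_to_int8_list(hex_list):
--     # converts the hexadecimal list into a list of int8 values, so the tb doesn't have to do that in funny ways
--     int8_lists = []
--
--     for hex_value in hex_list:
--         # Convert the hexadecimal string to a binary string (without the "0x" prefix)
--         binary_value = bin(int(hex_value, 16))[2:].zfill(512)  # Ensure 512 bits
--
--         # Split the binary string into chunks of 8 bits
--         int8_chunks = [binary_value[i:i+8] for i in range(0, 512, 8)]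
--         int8_chunks.reverse()
--         # Convert each 8-bit chunk to an int8 value
--         int8_list = []
--         for chunk in int8_chunks:
--             # Convert from binary to integer, treating the value as signed
--             num = int(chunk, 2)
--             if num >= 128:  # Handle two's complement for negative values
--                 num -= 256
--             int8_list.append(num)
--
--         # Append the list of int8 values to the final result
--         int8_lists.append(int8_list)
--
--     return int8_lists
-- ===== SOURCE B (Python) =====
-- def hex_to_int8_list(hex_list):
--     # int.to_bytes gives the 64 little-endian bytes directly: no binary string,
--     # no chunk slicing, no reverse; only the signed fix-up per byte remains.
--     return [
--         [b - 256 if b >= 128 else b for b in int(h, 16).to_bytes(64, 'little')]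
--         for h in hex_list
--     ]
-- ===== Notes on version B (the rewrite author's own statement) =====
-- stated objective: idiomatic
-- what changed: Replaces the binary-string construction (bin/zfill/8-bit slice chunks/reverse/int(chunk,2)) with a direct little-endian byte extraction via int.to_bytes, keeping only the per-byte signed fix-up.
import Mathlib
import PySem

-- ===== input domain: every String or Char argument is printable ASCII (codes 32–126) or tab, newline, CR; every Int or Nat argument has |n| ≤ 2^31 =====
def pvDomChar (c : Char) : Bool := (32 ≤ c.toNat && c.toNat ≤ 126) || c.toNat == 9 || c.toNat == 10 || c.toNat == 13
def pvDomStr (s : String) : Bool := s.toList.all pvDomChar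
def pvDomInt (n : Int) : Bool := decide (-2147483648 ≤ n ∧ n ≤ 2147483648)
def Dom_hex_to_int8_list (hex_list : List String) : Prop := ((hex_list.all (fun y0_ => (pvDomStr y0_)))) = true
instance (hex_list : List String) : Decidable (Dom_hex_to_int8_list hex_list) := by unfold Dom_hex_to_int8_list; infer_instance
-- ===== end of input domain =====

-- B replaces A's binary-string machinery (bin/zfill/8-bit chunk slices/reverse/int(chunk,2))
-- by direct little-endian byte extraction (int.to_bytes, ported as shift-and-mask), keeping only
-- the per-byte signed fix-up: idiomatic and lighter per value.

-- ===== PORT A =====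
-- one string of A's loop body (the .getD 0 only covers inputs where Python raises; excluded by Pre_)
def pvHexA1 (hex_value : String) : List Int :=
  let binary_value := PySem.Chars.zfill
    (PySem.List.slice (PySem.Int.pyBin ((PySem.Int.ofStrBase? hex_value 16).getD 0)).toList (some 2) none) 512
  let int8_chunks :=
    ((PySem.List.pyRange 0 512 8).map (fun i => PySem.List.slice binary_value (some i) (some (i + 8)))).reverse
  int8_chunks.foldl (fun int8_list chunk =>
    let num := (PySem.Int.ofCharsBase? chunk 2).getD 0
    let num := if num ≥ 128 then num - 256 else num
    int8_list ++ [num]) []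

def hex_to_int8_list (hex_list : List String) : List (List Int) :=
  hex_list.foldl (fun int8_lists hex_value => int8_lists ++ [pvHexA1 hex_value]) []

-- ===== PORT B =====
-- one string of B's comprehension: int(h,16).to_bytes(64,'little') ported as the 64 shift-and-mask bytes
def pvHexB1 (h : String) : List Int :=
  ((List.range 64).map (fun i : Nat => PySem.Int.band (((PySem.Int.ofStrBase? h 16).getD 0) >>> (8 * i)) 255)).map
    (fun b => if b ≥ 128 then b - 256 else b)

def hex_to_int8_list_alt (hex_list : List String) : List (List Int) :=
  hex_list.map pvHexB1

-- ===== PRECONDITION & SPEC =====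
-- Pre_ admits exactly the valid-hex inputs whose value fits in 512 bits: on non-hex or negative
-- strings A raises ValueError; on values ≥ 2^512 A returns the leading 512 bits while B's
-- int.to_bytes raises OverflowError, so those inputs are excluded too (see claim cites).
def pvValidHex512 (s : String) : Bool :=
  match PySem.Int.ofStrBase? s 16 with
  | some n => decide (0 ≤ n ∧ n < 13407807929942597099574024998205846127479365820592393377723561443721764030073546976801874298166903427690031858186486050853753882811946569946433649006084096)  -- the literal is 2 ^ 512
  | none => false

def Pre_hex_to_int8_list (hex_list : List String) : Prop :=
  ∀ s ∈ hex_list, pvValidHex512 s = true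
instance (hex_list : List String) : Decidable (Pre_hex_to_int8_list hex_list) := by
  unfold Pre_hex_to_int8_list; infer_instance

def pvWitness_hex_to_int8_list : List String := ["ff", "0", "DEAD_beef"]

def Spec_hex_to_int8_list (hex_list : List String) (out : List (List Int)) : Prop := out = hex_to_int8_list_alt hex_list
instance (hex_list : List String) (out : List (List Int)) : Decidable (Spec_hex_to_int8_list hex_list out) := by unfold Spec_hex_to_int8_list; infer_instance

-- ===== CLAIM (what is proved, stated in full; the proofs are below) =====
def Claim_equal_hex_to_int8_list : Prop := ∀ (hex_list : List String), Dom_hex_to_int8_list hex_list → Pre_hex_to_int8_list hex_list → Spec_hex_to_int8_list hex_list (hex_to_int8_list hex_list)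

-- ===== LEMMAS AND PROOFS =====

-- the k-bit big-endian binary digit string of n (spec-side helper for the proof only)
def bitsBE : Nat → Nat → List Char
  | _, 0 => []
  | n, k + 1 => bitsBE (n / 2) k ++ [if n % 2 = 0 then '0' else '1']

lemma bitsBE_length (n k : Nat) : (bitsBE n k).length = k := by
  induction k generalizing n with
  | zero => rfl
  | succ k ih => simp [bitsBE, ih]

lemma bitsBE_zero (k : Nat) : bitsBE 0 k = List.replicate k '0' := by
  induction k with
  | zero => rfl
  | succ k ih =>
    rw [bitsBE]
    simp only [Nat.zero_div, Nat.zero_mod, reduceIte]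
    rw [ih, ← List.replicate_succ']

-- splitting: the top a bits are the quotient, the bottom b bits the remainder
lemma bitsBE_split (n a b : Nat) :
    bitsBE n (a + b) = bitsBE (n / 2 ^ b) a ++ bitsBE (n % 2 ^ b) b := by
  induction b generalizing n with
  | zero => simp [bitsBE]
  | succ b ih =>
    have h1 : n % 2 ^ (b + 1) / 2 = n / 2 % 2 ^ b := by
      rw [pow_succ']; exact Nat.mod_mul_right_div_self n 2 (2 ^ b)
    have h2 : n % 2 ^ (b + 1) % 2 = n % 2 :=
      Nat.mod_mod_of_dvd n (dvd_pow_self 2 (Nat.succ_ne_zero b))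
    have h3 : n / 2 / 2 ^ b = n / 2 ^ (b + 1) := by
      rw [Nat.div_div_eq_div_mul, pow_succ']
    show bitsBE n (a + b + 1) = _
    rw [bitsBE, ih (n := n / 2), bitsBE, h1, h2, h3, List.append_assoc]

-- natBits n: binary digits of n without leading zeros (natBits 0 = ['0']), MSB first
def natBits (n : Nat) : List Char :=
  if n < 2 then [if n = 0 then '0' else '1']
  else natBits (n / 2) ++ [if n % 2 = 0 then '0' else '1']
decreasing_by exact Nat.div_lt_self (by omega) (by omega)

lemma natBits_cons (n : Nat) (h : 2 ≤ n) :
    natBits n = natBits (n / 2) ++ [if n % 2 = 0 then '0' else '1'] := by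
  conv_lhs => rw [natBits]
  rw [if_neg (by omega)]

lemma toDigitsCore_eq_natBits : ∀ (f n : Nat) (ds : List Char), 0 < f → n < 2 ^ f →
    Nat.toDigitsCore 2 f n ds = natBits n ++ ds := by
  intro f
  induction f with
  | zero => intro n ds hf h; omega
  | succ f ih =>
    intro n ds hf h
    rw [Nat.toDigitsCore]
    by_cases h2 : n / 2 = 0
    · have hn : n < 2 := by omega
      rw [if_pos h2]
      conv_rhs => rw [natBits]
      rw [if_pos hn]
      have : Nat.digitChar (n % 2) = if n = 0 then '0' else '1' := by
        interval_cases n <;> rfl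
      simp [this]
    · have hq : n / 2 < 2 ^ f := by rw [pow_succ] at h; omega
      have hf' : 0 < f := by
        by_contra hc
        have hf0 : f = 0 := by omega
        subst hf0
        norm_num at h
        omega
      rw [if_neg h2, ih (n / 2) _ hf' hq, natBits_cons n (by omega)]
      have : Nat.digitChar (n % 2) = if n % 2 = 0 then '0' else '1' := by
        have := Nat.mod_lt n (show 0 < 2 by omega)
        interval_cases h : n % 2 <;> rfl
      simp [this]

lemma toDigits_eq_natBits (n : Nat) : Nat.toDigits 2 n = natBits n := by
  have h : n < 2 ^ (n + 1) := by
    calc n < n + 1 := by omega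
    _ ≤ 2 ^ (n + 1) := Nat.le_of_lt Nat.lt_two_pow_self
  simpa using toDigitsCore_eq_natBits (n + 1) n [] (by omega) h

lemma natBits_pad (n k : Nat) (h : n < 2 ^ k) (hk : 1 ≤ k) :
    List.replicate (k - (natBits n).length) '0' ++ natBits n = bitsBE n k := by
  induction k generalizing n with
  | zero => omega
  | succ k ih =>
    by_cases hn : n < 2
    · conv_lhs => rw [natBits]
      rw [if_pos hn, bitsBE]
      have hd : n / 2 = 0 := by omega
      have hm : (if n % 2 = 0 then '0' else '1') = (if n = 0 then '0' else '1') := by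
        interval_cases n <;> rfl
      rw [hd, bitsBE_zero, hm]
      simp
    · have hk1 : 1 ≤ k := by
        by_contra hc
        have hk0 : k = 0 := by omega
        subst hk0
        simp at h
        omega
      have hq : n / 2 < 2 ^ k := by rw [pow_succ] at h; omega
      have hrec := ih (n / 2) hq hk1
      rw [natBits_cons n (by omega), bitsBE, List.length_append]
      have hlen : (natBits (n / 2)).length ≤ k := by
        have hl := congrArg List.length hrec
        simp [bitsBE_length] at hl
        omega
      have harith : k + 1 - ((natBits (n / 2)).length + [if n % 2 = 0 then '0' else '1'].length)
          = k - (natBits (n / 2)).length := by simp only [List.length_cons, List.length_nil]; omega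
      rw [harith, ← List.append_assoc, hrec]

lemma natBits_chars (n : Nat) : ∀ c ∈ natBits n, c = '0' ∨ c = '1' := by
  induction n using Nat.strong_induction_on with
  | _ n ih =>
    by_cases hn : n < 2
    · rw [natBits, if_pos hn]
      intro c hc
      simp at hc
      subst hc
      split <;> simp
    · rw [natBits_cons n (by omega)]
      intro c hc
      rcases List.mem_append.mp hc with h | h
      · exact ih (n / 2) (Nat.div_lt_self (by omega) (by omega)) c h
      · simp at h
        subst h
        split <;> simp

lemma zfill_cons (c : Char) (cs : List Char) (w : Int) :
    PySem.Chars.zfill (c :: cs) w = if w ≤ (c :: cs).length then c :: cs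
      else if c = '+' ∨ c = '-' then c :: (List.replicate (w.toNat - (c :: cs).length) '0' ++ cs)
      else List.replicate (w.toNat - (c :: cs).length) '0' ++ (c :: cs) := by
  rfl

lemma zfill_toDigits (n k : Nat) (h : n < 2 ^ k) (hk : 1 ≤ k) :
    PySem.Chars.zfill (Nat.toDigits 2 n) (k : Int) = bitsBE n k := by
  rw [toDigits_eq_natBits]
  have hne : natBits n ≠ [] := by
    rw [natBits]; split <;> simp
  have hlen : (natBits n).length ≤ k := by
    have hl := congrArg List.length (natBits_pad n k h hk)
    simp [bitsBE_length] at hl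
    omega
  rcases hc : natBits n with _ | ⟨c, cs⟩
  · exact absurd hc hne
  rw [zfill_cons]
  by_cases hle : (k : Int) ≤ ((c :: cs).length : Int)
  · rw [if_pos (by exact_mod_cast hle)]
    have hkl : (natBits n).length = k := by
      have h1 : (natBits n).length = cs.length + 1 := by rw [hc]; simp
      have h2 : k ≤ cs.length + 1 := by exact_mod_cast hle
      omega
    have hp := natBits_pad n k h hk
    rw [hkl, Nat.sub_self, List.replicate_zero, List.nil_append, hc] at hp
    exact hp
  · rw [if_neg (by exact_mod_cast hle)]
    have hnotsign : ¬(c = '+' ∨ c = '-') := by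
      rcases natBits_chars n c (by rw [hc]; simp) with h0 | h0 <;> simp [h0]
    rw [if_neg hnotsign]
    have hlc : ((k : Int).toNat - (c :: cs).length) = k - (natBits n).length := by
      rw [hc]; simp
    rw [hlc, ← hc, natBits_pad n k h hk]

-- every byte chunk parses back to its value (finite check over the 256 bytes)
set_option maxHeartbeats 4000000 in
set_option maxRecDepth 10000 in
lemma parse_bitsBE8 : ∀ m : Fin 256, PySem.Int.ofCharsBase? (bitsBE m.val 8) 2 = some (m.val : Int) := by
  decide

-- chunk j of the 512-bit string is byte 63 - j
lemma chunk_eq (m j : Nat) (hj : j < 64) :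
    List.take 8 (List.drop (8 * j) (bitsBE m 512)) = bitsBE (m / 2 ^ (8 * (63 - j)) % 256) 8 := by
  have h512 : 512 = 8 * j + (8 + 8 * (63 - j)) := by omega
  rw [h512, bitsBE_split m (8 * j) (8 + 8 * (63 - j)),
    List.drop_left' (by rw [bitsBE_length]),
    bitsBE_split _ 8 (8 * (63 - j)),
    List.take_left' (by rw [bitsBE_length])]
  congr 1
  rw [show (256 : Nat) = 2 ^ 8 from rfl,
    show (8 + 8 * (63 - j)) = 8 * (63 - j) + 8 by omega, pow_add]
  exact Nat.mod_mul_right_div_self m _ _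

-- B's byte i as a mod/div expression
lemma byteB_eq (m i : Nat) :
    PySem.Int.band ((m : Int) >>> (8 * i)) 255 = ((m / 2 ^ (8 * i) % 256 : Nat) : Int) := by
  have hsh : ((m : Int) >>> (8 * i)) = ((m >>> (8 * i) : Nat) : Int) := by exact_mod_cast rfl
  rw [hsh, show (255 : Int) = ((255 : Nat) : Int) from rfl, PySem.Int.band_natCast]
  congr 1
  rw [Nat.shiftRight_eq_div_pow]
  have h := Nat.and_two_pow_sub_one_eq_mod (m / 2 ^ (8 * i)) 8
  norm_num at h
  exact h

-- the chunk offsets of A are 8*0, …, 8*63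
lemma pyRange_chunks : PySem.List.pyRange 0 512 8 = (List.range 64).map (fun k : Nat => ((8 * k : Nat) : Int)) := by
  decide

-- per-string equality: A's loop body equals B's comprehension body on every valid 512-bit hex string
set_option maxRecDepth 4000 in
lemma inner_eq (s : String) (h : pvValidHex512 s = true) : pvHexA1 s = pvHexB1 s := by
  unfold pvValidHex512 at h
  rcases hp : PySem.Int.ofStrBase? s 16 with _ | n
  · rw [hp] at h; simp at h
  · rw [hp] at h
    simp only [decide_eq_true_eq] at h
    obtain ⟨hn0, hlt0⟩ := h
    have hlt : n < 2 ^ 512 := by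
      have hpow : (2 : Int) ^ 512 = 13407807929942597099574024998205846127479365820592393377723561443721764030073546976801874298166903427690031858186486050853753882811946569946433649006084096 := by
        decide
      rw [hpow]
      exact hlt0
    set m := n.toNat with hm
    have hnm : n = (m : Int) := by omega
    have hmlt : m < 2 ^ 512 := by
      have hc : (m : Int) < 2 ^ 512 := by rw [← hnm]; exact_mod_cast hlt
      exact_mod_cast hc
    unfold pvHexA1 pvHexB1
    rw [hp]
    simp only [Option.getD_some, hnm]
    have hbin : PySem.List.slice (PySem.Int.pyBin (m : Int)).toList (some 2) none
        = Nat.toDigits 2 m := by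
      rw [PySem.Int.toList_pyBin, PySem.Int.toBinChars0b, if_neg (by omega),
        PySem.List.slice_from _ (by norm_num)]
      simp
    rw [hbin, pyRange_chunks,
      show ((512 : Int)) = ((512 : Nat) : Int) from rfl,
      zfill_toDigits m 512 hmlt (by omega),
      PySem.List.foldl_append_singleton_eq_map]
    simp only [List.nil_append, ← List.map_reverse,
      show (List.range 64).reverse = (List.range 64).map (fun k => 63 - k) from by decide,
      List.map_map]
    apply List.map_congr_left
    intro idx hidx
    have hidx64 : idx < 64 := List.mem_range.mp hidx
    simp only [Function.comp_apply]
    set j := 63 - idx with hj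
    have hjlt : j < 64 := by omega
    have hcast : PySem.List.slice (bitsBE m 512) (some ((8 * j : Nat) : Int))
          (some (((8 * j : Nat) : Int) + 8)) = List.take 8 (List.drop (8 * j) (bitsBE m 512)) := by
      rw [show (((8 * j : Nat) : Int) + 8) = ((8 * j + 8 : Nat) : Int) by push_cast; ring,
        PySem.List.slice_natCast]
      congr 1
      omega
    rw [hcast, chunk_eq m j hjlt]
    have hb : m / 2 ^ (8 * (63 - j)) % 256 < 256 := Nat.mod_lt _ (by omega)
    rw [parse_bitsBE8 ⟨m / 2 ^ (8 * (63 - j)) % 256, hb⟩]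
    simp only [Option.getD_some]
    rw [byteB_eq m idx, show 63 - j = idx by omega]

-- ===== VERDICT (by name: the statement is the Claim_ definition above) =====
theorem hex_to_int8_list_spec : Claim_equal_hex_to_int8_list := by
  intro hex_list _ hpre
  unfold Spec_hex_to_int8_list hex_to_int8_list hex_to_int8_list_alt
  rw [PySem.List.foldl_append_singleton_eq_map]
  simp only [List.nil_append]
  exact List.map_congr_left (fun s hs => inner_eq s (hpre s hs))
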